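-- pv_equiv track=rewrite | github.com/jay-taylor/charliepy | charliepy/utils/combinat.py | centraliserpartition
-- ===== SOURCE A (Python) =====
-- def centraliserpartition(n, mu): #pycox
--     """Returns the order of the centraliser of an element of cycle type of a
--     given partition in the full symmetric group. (The program is taken from the
--     GAP library and re-written almost 1-1 in python.)
--     """
--     res, last, k = 1, 0, 1
--     for p in mu:
--         res *= p
--         if p == last:
--             k += 1
--             res *= k
--         else:
--             k = 1
--         last = p
--     return res
-- ===== SOURCE B (Python) =====
-- from math import comb
--
--
-- def _dc(seg):
--     # returns (res, firstval, firstlen, lastval, lastlen) for nonempty seg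
--     if len(seg) == 1:
--         p = seg[0]
--         return (p, p, 1, p, 1)
--     mid = len(seg) // 2
--     resL, fvL, flL, lvL, llL = _dc(seg[:mid])
--     resR, fvR, flR, lvR, llR = _dc(seg[mid:])
--     res = resL * resR
--     if lvL == fvR:
--         res *= comb(llL + flR, llL)
--     fl = flL + flR if flL == mid and fvL == fvR else flL
--     ll = llL + llR if llR == len(seg) - mid and lvR == lvL else llR
--     return (res, fvL, fl, lvR, ll)
--
--
-- def centraliserpartition(n, mu):
--     if not mu:
--         return 1
--     return _dc(mu)[0]
-- ===== Notes on version B (the rewrite author's own statement) =====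
-- stated objective: alternative
-- what changed: Replaces A's left-to-right last/k state machine (which grows the factorial and power of a run incrementally) by a divide-and-conquer: each half returns its product together with its first/last run value and length, and halves are combined with a binomial-coefficient correction math.comb(a+b, a) when the border runs merge.
import Mathlib
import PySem

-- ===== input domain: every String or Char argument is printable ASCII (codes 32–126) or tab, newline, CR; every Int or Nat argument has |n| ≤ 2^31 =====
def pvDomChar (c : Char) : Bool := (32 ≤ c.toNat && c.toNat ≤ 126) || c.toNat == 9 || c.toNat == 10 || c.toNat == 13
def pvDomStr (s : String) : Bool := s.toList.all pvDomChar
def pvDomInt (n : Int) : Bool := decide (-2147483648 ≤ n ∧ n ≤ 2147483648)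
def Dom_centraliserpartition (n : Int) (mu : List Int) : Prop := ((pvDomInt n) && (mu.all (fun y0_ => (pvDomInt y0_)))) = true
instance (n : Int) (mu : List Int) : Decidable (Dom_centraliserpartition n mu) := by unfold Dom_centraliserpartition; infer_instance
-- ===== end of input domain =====

-- B replaces A's left-to-right last/k state machine by a divide-and-conquer: each half
-- reports (product, first/last run value and length) and halves are combined with a
-- binomial-coefficient correction when the border runs merge (objective: alternative).

-- ===== PORT A =====
-- the for-loop of A over state (res, last, k)
def pvLoopA : List Int → Int → Int → Int → Int
  | [], res, _, _ => res
  | p :: t, res, last, k =>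
    let res := res * p
    if p == last then pvLoopA t (res * (k + 1)) p (k + 1)
    else pvLoopA t res p 1

def centraliserpartition (n : Int) (mu : List Int) : Int := pvLoopA mu 1 0 1

-- ===== PORT B =====
-- _dc(seg): returns (res, firstval, firstlen, lastval, lastlen) for a nonempty
-- segment; the [] branch is unreachable (the caller guards against it).
def pvDC : List Int → Int × Int × Nat × Int × Nat
  | [] => (1, 0, 0, 0, 0)
  | [p] => (p, p, 1, p, 1)
  | a :: b :: t =>
    let seg := a :: b :: t
    let mid := seg.length / 2
    let dL := pvDC (seg.take mid)
    let dR := pvDC (seg.drop mid)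
    let res0 := dL.1 * dR.1
    let res := if dL.2.2.2.1 == dR.2.1 then res0 * (((dL.2.2.2.2 + dR.2.2.1).choose dL.2.2.2.2 : Nat) : Int) else res0
    let fl := if dL.2.2.1 == mid && dL.2.1 == dR.2.1 then dL.2.2.1 + dR.2.2.1 else dL.2.2.1
    let ll := if dR.2.2.2.2 == seg.length - mid && dR.2.2.2.1 == dL.2.2.2.1 then dL.2.2.2.2 + dR.2.2.2.2 else dR.2.2.2.2
    (res, dL.2.1, fl, dR.2.2.2.1, ll)
termination_by l => l.length
decreasing_by
  · simp [List.length_take]; omega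
  · simp; omega

def centraliserpartition_alt (n : Int) (mu : List Int) : Int :=
  if mu.isEmpty then 1 else (pvDC mu).1

-- ===== PRECONDITION & SPEC =====
def Spec_centraliserpartition (n : Int) (mu : List Int) (out : Int) : Prop := out = centraliserpartition_alt n mu
instance (n : Int) (mu : List Int) (out : Int) : Decidable (Spec_centraliserpartition n mu out) := by unfold Spec_centraliserpartition; infer_instance

-- ===== CLAIM (what is proved, stated in full; the proofs are below) =====
def Claim_equal_centraliserpartition : Prop := ∀ (n : Int) (mu : List Int), Dom_centraliserpartition n mu → Spec_centraliserpartition n mu (centraliserpartition n mu)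

-- ===== LEMMAS AND PROOFS =====

-- runs of consecutive equal values, as (value, run length), and the product of their
-- closed-form factors p^L * L! — the common characterisation both ports are equal to
def pvRuns : List Int → List (Int × Nat)
  | [] => []
  | p :: t =>
    (p, 1 + (t.takeWhile (fun x => x == p)).length) :: pvRuns (t.dropWhile (fun x => x == p))
termination_by l => l.length
decreasing_by
  have h := List.length_dropWhile_le (fun x => x == p) t
  simp; omega

def pvProdRuns : List (Int × Nat) → Int
  | [] => 1
  | pr :: t => pr.1 ^ pr.2 * (Nat.factorial pr.2 : Int) * pvProdRuns t

def pvR (l : List Int) : Int := pvProdRuns (pvRuns l)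

-- leading / trailing run lengths
def pvLead : List Int → Nat
  | [] => 0
  | p :: t => 1 + (t.takeWhile (fun x => x == p)).length

def pvTrail (l : List Int) : Nat := pvLead l.reverse

-- merge correction factor for a concatenation
def pvCorr (x y : Int) (a b : Nat) : Int := if x = y then ((a + b).choose a : Int) else 1

-- rising factorial (k+1)(k+2)…(k+r): the factor A's k-state contributes to a run
def pvRF (k : Int) : Nat → Int
  | 0 => 1
  | r + 1 => (k + 1) * pvRF (k + 1) r

theorem pvRF_fact (r : Nat) : ∀ (k : Nat), pvRF (k : Int) r * (Nat.factorial k : Int) = (Nat.factorial (k + r) : Int) := by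
  induction r with
  | zero => intro k; simp [pvRF]
  | succ r ih =>
    intro k
    have hk : ((k : Int) + 1) = ((k + 1 : Nat) : Int) := by push_cast; ring
    calc pvRF (k : Int) (r + 1) * (Nat.factorial k : Int)
        = pvRF ((k + 1 : Nat) : Int) r * (((k + 1 : Nat) : Int) * (Nat.factorial k : Int)) := by
          simp only [pvRF, hk]; ring
      _ = pvRF ((k + 1 : Nat) : Int) r * (Nat.factorial (k + 1) : Int) := by
          rw [Nat.factorial_succ]; push_cast; ring
      _ = (Nat.factorial (k + 1 + r) : Int) := ih (k + 1)
      _ = (Nat.factorial (k + (r + 1)) : Int) := by ring_nf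

theorem pvRF_one (r : Nat) : pvRF 1 r = (Nat.factorial (1 + r) : Int) := by
  have := pvRF_fact r 1
  simpa [Nat.factorial] using this

-- A's loop in terms of the leading run of `last` and the run product of the rest
theorem pvLoopA_eq (mu : List Int) : ∀ (res last k : Int),
    pvLoopA mu res last k =
      res * last ^ (mu.takeWhile (fun x => x == last)).length
          * pvRF k (mu.takeWhile (fun x => x == last)).length
          * pvR (mu.dropWhile (fun x => x == last)) := by
  induction mu with
  | nil => intro res last k; simp [pvLoopA, pvRF, pvR, pvRuns, pvProdRuns]
  | cons p t ih =>
    intro res last k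
    by_cases h : p = last
    · subst h
      simp only [pvLoopA, List.takeWhile, List.dropWhile, beq_self_eq_true, if_pos]
      rw [ih (res * p * (k + 1)) p (k + 1)]
      simp only [List.length_cons, pvRF]
      ring
    · have hb : (p == last) = false := beq_eq_false_iff_ne.mpr h
      simp only [pvLoopA, hb, Bool.false_eq_true, if_false, List.takeWhile, List.dropWhile]
      rw [ih (res * p) p 1]
      simp only [List.length_nil, pow_zero, pvRF, pvR, pvRuns, pvProdRuns, pvRF_one]
      ring

theorem pvA_eq_R (n : Int) (mu : List Int) : centraliserpartition n mu = pvR mu := by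
  unfold centraliserpartition
  rw [pvLoopA_eq]
  cases mu with
  | nil => simp [pvR, pvRuns, pvProdRuns, pvRF]
  | cons p t =>
    by_cases h : p = 0
    · subst h
      simp [List.takeWhile, List.dropWhile, pvR, pvRuns, pvProdRuns]
    · have hb : (p == (0 : Int)) = false := beq_eq_false_iff_ne.mpr h
      simp [List.takeWhile, List.dropWhile, hb, pvRF]

-- basic facts about heads, lasts and run lengths
theorem pvHeadD_reverse (l : List Int) : l.reverse.headD 0 = l.getLastD 0 := by
  rw [List.headD_eq_head?_getD, List.getLastD_eq_getLast?, List.head?_reverse]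

theorem pvLead_eq_length_iff (p : Int) (t : List Int) :
    pvLead (p :: t) = (p :: t).length ↔ ∀ x ∈ t, x = p := by
  constructor
  · intro h
    have hl : (t.takeWhile (fun x => x == p)).length = t.length := by
      simp [pvLead] at h; omega
    have heq : t.takeWhile (fun x => x == p) = t :=
      (List.takeWhile_prefix _).eq_of_length hl
    intro x hx
    have := List.takeWhile_eq_self_iff.mp heq x hx
    simpa using this
  · intro h
    have heq : t.takeWhile (fun x => x == p) = t :=
      List.takeWhile_eq_self_iff.mpr (fun x hx => by simpa using h x hx)
    simp [pvLead, heq, Nat.add_comm]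

theorem pvLead_append (xs ys : List Int) (hx : xs ≠ []) (hy : ys ≠ []) :
    pvLead (xs ++ ys) =
      if pvLead xs = xs.length ∧ xs.headD 0 = ys.headD 0 then pvLead xs + pvLead ys else pvLead xs := by
  obtain ⟨p, t, rfl⟩ := List.exists_cons_of_ne_nil hx
  obtain ⟨q, w, rfl⟩ := List.exists_cons_of_ne_nil hy
  have hle : (t.takeWhile (fun x => x == p)).length ≤ t.length :=
    (List.takeWhile_prefix _).length_le
  simp only [List.cons_append, pvLead, List.takeWhile_append, List.headD_cons, List.length_cons]
  by_cases hc : (t.takeWhile (fun x => x == p)).length = t.length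
  · by_cases hpq : p = q
    · subst hpq
      simp [hc, Nat.add_comm, Nat.add_assoc, Nat.add_left_comm]
    · have hb : ((q == p) : Bool) = false := by
        simp; exact fun h => hpq h.symm
      simp [hc, hb, hpq]
  · have hne : ¬ (1 + (t.takeWhile (fun x => x == p)).length = t.length + 1) := by omega
    simp [hc, hne]

theorem pvGetLastD_append (xs ys : List Int) (hy : ys ≠ []) :
    (xs ++ ys).getLastD 0 = ys.getLastD 0 := by
  rw [List.getLastD_eq_getLast?, List.getLastD_eq_getLast?, List.getLast?_append_of_ne_nil _ hy]

theorem pvHeadD_append (xs ys : List Int) (hx : xs ≠ []) :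
    (xs ++ ys).headD 0 = xs.headD 0 := by
  obtain ⟨p, t, rfl⟩ := List.exists_cons_of_ne_nil hx
  simp

theorem pvTrail_append (xs ys : List Int) (hx : xs ≠ []) (hy : ys ≠ []) :
    pvTrail (xs ++ ys) =
      if pvTrail ys = ys.length ∧ ys.getLastD 0 = xs.getLastD 0 then pvTrail xs + pvTrail ys else pvTrail ys := by
  unfold pvTrail
  rw [List.reverse_append, pvLead_append _ _ (by simpa using hy) (by simpa using hx)]
  simp only [pvHeadD_reverse, List.length_reverse]
  split_ifs with h
  · exact Nat.add_comm _ _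
  · rfl

-- every element of a list with maximal trailing run equals its last element
theorem pvTrail_full (v : List Int) (hv : v ≠ []) (h : pvTrail v = v.length) :
    ∀ x ∈ v, x = v.getLastD 0 := by
  intro x hx
  have hrne : v.reverse ≠ [] := by simpa using hv
  obtain ⟨a, b, hab⟩ := List.exists_cons_of_ne_nil hrne
  have hlen : pvLead (a :: b) = (a :: b).length := by
    rw [← hab]; unfold pvTrail at h; rw [h, ← List.length_reverse (as := v), hab]
  have hall := (pvLead_eq_length_iff a b).mp hlen
  have hgl : v.getLastD 0 = a := by
    rw [← pvHeadD_reverse, hab]; rfl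
  have hx' : x ∈ a :: b := by rw [← hab]; simpa using hx
  rcases List.mem_cons.mp hx' with h1 | h2
  · rw [hgl, h1]
  · rw [hgl]; exact hall x h2

theorem pvGetLastD_const (p : Int) (u : List Int) (hu : ∀ x ∈ u, x = p) :
    (p :: u).getLastD 0 = p := by
  have hne : (p :: u) ≠ [] := by simp
  have h1 : (p :: u).getLastD 0 = (p :: u).getLast hne := by
    rw [List.getLastD_eq_getLast?, List.getLast?_eq_some_getLast hne]; rfl
  have h2 := List.getLast_mem hne
  rw [h1]
  rcases List.mem_cons.mp h2 with h | h
  · exact h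
  · exact hu _ h

-- a list p::u++v with u all p and v starting off p keeps v's trailing run
theorem pvTrail_cons_of_ne (p : Int) (u v : List Int) (hu : ∀ x ∈ u, x = p)
    (hv : v ≠ []) (hne : v.headD 0 ≠ p) :
    pvTrail (p :: (u ++ v)) = pvTrail v ∧ (p :: (u ++ v)).getLastD 0 = v.getLastD 0 := by
  have h1 : (p :: (u ++ v)) = (p :: u) ++ v := by simp
  refine ⟨?_, by rw [h1, pvGetLastD_append _ _ hv]⟩
  rw [h1, pvTrail_append _ _ (by simp) hv]
  have hcond : ¬ (pvTrail v = v.length ∧ v.getLastD 0 = (p :: u).getLastD 0) := by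
    rintro ⟨hconst, hlast⟩
    obtain ⟨q, w, rfl⟩ := List.exists_cons_of_ne_nil hv
    have hq : q = (q :: w).getLastD 0 := pvTrail_full _ hv hconst q (by simp)
    rw [hlast, pvGetLastD_const p u hu] at hq
    exact hne (by simpa using hq)
  rw [if_neg hcond]

-- trailing run of a constant list is the whole list
theorem pvTrail_const (p : Int) (t : List Int) (ht : ∀ x ∈ t, x = p) :
    pvTrail (p :: t) = (p :: t).length := by
  have hrne : (p :: t).reverse ≠ [] := by simp
  obtain ⟨a, b, hab⟩ := List.exists_cons_of_ne_nil hrne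
  have hmem : ∀ x ∈ (p :: t).reverse, x = p := by
    intro x hx; rcases List.mem_cons.mp (List.mem_reverse.mp hx) with h | h
    · exact h
    · exact ht x h
  have ha : a = p := hmem a (by rw [hab]; simp)
  have hb : ∀ x ∈ b, x = a := by
    intro x hx; rw [ha]; exact hmem x (by rw [hab]; simp [hx])
  unfold pvTrail
  rw [hab, (pvLead_eq_length_iff a b).mpr hb, ← hab]
  simp

theorem pvR_cons (p : Int) (z : List Int) :
    pvR (p :: z) = p ^ (1 + (z.takeWhile (fun x => x == p)).length)
      * (Nat.factorial (1 + (z.takeWhile (fun x => x == p)).length) : Int)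
      * pvR (z.dropWhile (fun x => x == p)) := by
  simp [pvR, pvRuns, pvProdRuns]

-- the key concatenation law for the run product
theorem pvR_append (N : Nat) : ∀ (xs ys : List Int), xs.length ≤ N → xs ≠ [] → ys ≠ [] →
    pvR (xs ++ ys) = pvR xs * pvR ys * pvCorr (xs.getLastD 0) (ys.headD 0) (pvTrail xs) (pvLead ys) := by
  induction N with
  | zero =>
    intro xs ys h hx _
    cases xs with
    | nil => exact absurd rfl hx
    | cons a b => simp at h
  | succ N ih =>
    intro xs ys hlen hx hy
    obtain ⟨p, t, rfl⟩ := List.exists_cons_of_ne_nil hx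
    set u := t.takeWhile (fun x => x == p) with hu_def
    set v := t.dropWhile (fun x => x == p) with hv_def
    have htuv : u ++ v = t := List.takeWhile_append_dropWhile
    have hu : ∀ x ∈ u, x = p := fun x hx => by
      have := List.mem_takeWhile_imp hx; simpa using this
    have hstep : (p :: t) ++ ys = p :: (t ++ ys) := by simp
    by_cases hv : v = []
    · -- xs is constant
      have hut : u = t := by rw [← htuv, hv, List.append_nil]
      have ht : ∀ x ∈ t, x = p := hut ▸ hu
      have htw : t.takeWhile (fun x => x == p) = t := by rw [← hu_def, hut]
      obtain ⟨q, w, rfl⟩ := List.exists_cons_of_ne_nil hy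
      have htrail : pvTrail (p :: t) = t.length + 1 := by
        rw [pvTrail_const p t ht]; simp
      have hlast : (p :: t).getLastD 0 = p := pvGetLastD_const p t ht
      by_cases hpq : q = p
      · subst hpq
        rw [hstep, pvR_cons]
        have h1 : (t ++ q :: w).takeWhile (fun x => x == q) = t ++ (q :: (w.takeWhile (fun x => x == q))) := by
          rw [List.takeWhile_append, htw]
          simp
        have h2 : (t ++ q :: w).dropWhile (fun x => x == q) = w.dropWhile (fun x => x == q) := by
          rw [List.dropWhile_append]
          have : t.dropWhile (fun x => x == q) = [] := by rw [← hv_def, hv]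
          simp [this]
        rw [h1, h2]
        rw [pvR_cons q t, htw, ← hv_def, hv, pvR_cons q w]
        have hRnil : pvR [] = 1 := by simp [pvR, pvRuns, pvProdRuns]
        rw [hRnil]
        rw [htrail, hlast]
        simp only [List.headD_cons, pvCorr, pvLead]
        set b := (w.takeWhile (fun x => x == q)).length
        set k := t.length
        have hchoose := Nat.add_choose_mul_factorial_mul_factorial (1 + b) (k + 1)
        have hlen2 : (t ++ q :: w.takeWhile (fun x => x == q)).length = k + (1 + b) := by
          simp only [List.length_append, List.length_cons]; omega
        rw [hlen2]
        have hll : 1 + (k + (1 + b)) = (1 + b) + (k + 1) := by omega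
        have hrr : (k + 1) + (1 + b) = (1 + b) + (k + 1) := by omega
        rw [hll, hrr]
        push_cast [← hchoose]
        ring
      · -- a new run starts at ys
        rw [hstep, pvR_cons]
        have hqb : ((q == p) : Bool) = false := by simpa using hpq
        have h1 : (t ++ q :: w).takeWhile (fun x => x == p) = t := by
          rw [List.takeWhile_append, htw]
          simp [hqb]
        have h2 : (t ++ q :: w).dropWhile (fun x => x == p) = q :: w := by
          rw [List.dropWhile_append]
          have : t.dropWhile (fun x => x == p) = [] := by rw [← hv_def, hv]
          simp [this, hqb]
        rw [h1, h2, pvR_cons p t, htw, ← hv_def, hv]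
        have hcorr : pvCorr ((p :: t).getLastD 0) ((q :: w).headD 0) (pvTrail (p :: t)) (pvLead (q :: w)) = 1 := by
          rw [hlast]
          simp only [List.headD_cons, pvCorr]
          rw [if_neg (fun h => hpq h.symm)]
        rw [hcorr]
        have hRnil : pvR [] = 1 := by simp [pvR, pvRuns, pvProdRuns]
        rw [hRnil]; ring
    · -- xs has a second run: peel the first run and recurse
      obtain ⟨q, w, hvqw⟩ := List.exists_cons_of_ne_nil hv
      have hqb : ((q == p) : Bool) = false := by
        have := List.head?_dropWhile_not (fun x => x == p) t
        rw [← hv_def, hvqw] at this; simpa using this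
      have hqp : q ≠ p := by simpa using hqb
      have hlenu : u.length ≠ t.length := by
        intro h
        have h2 := congrArg List.length htuv
        simp only [List.length_append] at h2
        have hv0 : v.length = 0 := by omega
        exact hv (List.eq_nil_of_length_eq_zero hv0)
      rw [hstep, pvR_cons]
      have h1 : (t ++ ys).takeWhile (fun x => x == p) = u := by
        rw [List.takeWhile_append, ← hu_def, if_neg hlenu]
      have h2 : (t ++ ys).dropWhile (fun x => x == p) = v ++ ys := by
        rw [List.dropWhile_append, ← hv_def]
        have : v.isEmpty = false := by rw [hvqw]; rfl
        simp [this]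
      rw [h1, h2]
      have hvlen : v.length ≤ N := by
        have h3 := congrArg List.length htuv
        simp at h3
        simp at hlen
        omega
      rw [ih v ys hvlen hv hy]
      have hne : v.headD 0 ≠ p := by rw [hvqw]; simpa using hqp
      obtain ⟨htr, hgl⟩ := pvTrail_cons_of_ne p u v hu hv hne
      have hx2 : p :: (u ++ v) = p :: t := by rw [htuv]
      rw [hx2] at htr hgl
      rw [htr, hgl, pvR_cons p t, ← hu_def, ← hv_def]
      ring

-- correctness of the divide-and-conquer: it returns the run product together with
-- the first/last run descriptors
theorem pvDC_eq (N : Nat) : ∀ (l : List Int), l.length ≤ N → l ≠ [] →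
    pvDC l = (pvR l, l.headD 0, pvLead l, l.getLastD 0, pvTrail l) := by
  induction N with
  | zero =>
    intro l h hl
    cases l with
    | nil => exact absurd rfl hl
    | cons a b => simp at h
  | succ N ih =>
    intro l hlen hl
    match l with
    | [p] =>
      simp [pvDC, pvR, pvRuns, pvProdRuns, pvLead, pvTrail, Nat.factorial]
    | a :: b :: t =>
      set seg := a :: b :: t with hseg
      set mid := seg.length / 2 with hmid
      have hlen2 : 2 ≤ seg.length := by simp [hseg]
      have hmid1 : 1 ≤ mid := by omega
      have hmidlt : mid < seg.length := by omega
      set xs := seg.take mid with hxs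
      set ys := seg.drop mid with hys
      have hxslen : xs.length = mid := by
        rw [hxs, List.length_take]; omega
      have hyslen : ys.length = seg.length - mid := by
        rw [hys, List.length_drop]
      have hxne : xs ≠ [] := by
        intro h; rw [h] at hxslen; simp at hxslen; omega
      have hyne : ys ≠ [] := by
        intro h; rw [h] at hyslen; simp at hyslen; omega
      have happ : xs ++ ys = seg := List.take_append_drop mid seg
      have hxsN : xs.length ≤ N := by omega
      have hysN : ys.length ≤ N := by omega
      have ihL := ih xs hxsN hxne
      have ihR := ih ys hysN hyne
      show pvDC seg = _
      rw [pvDC]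
      simp only [← hseg, ← hmid, ← hxs, ← hys, ihL, ihR]
      refine Prod.ext ?_ (Prod.ext ?_ (Prod.ext ?_ (Prod.ext ?_ ?_)))
      · show (if (xs.getLastD 0 == ys.headD 0) = true
              then pvR xs * pvR ys * (((pvTrail xs + pvLead ys).choose (pvTrail xs) : Nat) : Int)
              else pvR xs * pvR ys) = pvR seg
        rw [← happ, pvR_append (xs.length) xs ys le_rfl hxne hyne, pvCorr]
        by_cases hc : xs.getLastD 0 = ys.headD 0
        · simp [hc]
        · have hb : (xs.getLastD 0 == ys.headD 0) = false := beq_eq_false_iff_ne.mpr hc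
          simp [hb, hc]
      · show xs.headD 0 = seg.headD 0
        rw [← happ, pvHeadD_append _ _ hxne]
      · show (if (pvLead xs == mid) && (xs.headD 0 == ys.headD 0)
              then pvLead xs + pvLead ys else pvLead xs) = pvLead seg
        rw [← happ, pvLead_append _ _ hxne hyne, ← hxslen]
        by_cases h1 : pvLead xs = xs.length <;> by_cases h2 : xs.headD 0 = ys.headD 0 <;>
          simp [h1, h2]
      · show ys.getLastD 0 = seg.getLastD 0
        rw [← happ, pvGetLastD_append _ _ hyne]
      · show (if (pvTrail ys == seg.length - mid) && (ys.getLastD 0 == xs.getLastD 0)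
              then pvTrail xs + pvTrail ys else pvTrail ys) = pvTrail seg
        rw [← hyslen, ← happ, pvTrail_append _ _ hxne hyne]
        by_cases h1 : pvTrail ys = ys.length <;> by_cases h2 : ys.getLastD 0 = xs.getLastD 0 <;>
          simp [h1, h2]

-- ===== VERDICT (by name: the statement is the Claim_ definition above) =====
theorem centraliserpartition_spec : Claim_equal_centraliserpartition := by
  intro n mu _
  unfold Spec_centraliserpartition centraliserpartition_alt
  cases mu with
  | nil => simp [pvA_eq_R, pvR, pvRuns, pvProdRuns]
  | cons p t =>
    rw [pvA_eq_R]
    have h := pvDC_eq (p :: t).length (p :: t) le_rfl (by simp)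
    simp [h]
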